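-- pv_equiv track=rewrite | github.com/carsonetb/aoc-2025 | Day-6/part1.py | tokenize_line
-- ===== SOURCE A (Python) =====
-- def tokenize_line(line: str) -> list[str]:
--     token = ""
--     out = []
--     for char in line:
--         if (char == " " or char == "\n")and not token == "":
--             out.append(token)
--             token = ""
--         if char == " " or char == "\n":
--             continue
--         token += char
--     if token != "":
--         out.append(token)
--     return out
-- ===== SOURCE B (Python) =====
-- import re
--
-- def tokenize_line(line: str) -> list[str]:
--     return re.findall(r'[^ \n]+', line)
-- ===== Notes on version B (the rewrite author's own statement) =====
-- stated objective: idiomatic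
-- what changed: Replaces the explicit char-by-char accumulator loop with a single regex scan (re.findall of maximal runs of non-' '/'\n' characters).
import Mathlib
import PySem

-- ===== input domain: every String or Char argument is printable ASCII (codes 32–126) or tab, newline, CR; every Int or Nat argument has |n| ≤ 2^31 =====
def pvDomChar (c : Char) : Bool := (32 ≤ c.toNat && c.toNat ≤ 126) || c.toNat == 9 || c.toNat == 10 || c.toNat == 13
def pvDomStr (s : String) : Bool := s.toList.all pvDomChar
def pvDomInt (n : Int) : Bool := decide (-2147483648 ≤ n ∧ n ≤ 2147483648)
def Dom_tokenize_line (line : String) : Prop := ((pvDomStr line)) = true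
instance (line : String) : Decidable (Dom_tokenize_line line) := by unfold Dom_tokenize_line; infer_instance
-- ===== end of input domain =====

-- B replaces A's explicit char-by-char accumulator loop with a single regex-style scan
-- extracting maximal runs of non-' '/'\n' characters (idiomatic; same cost).

-- ===== PORT A =====
-- A's loop: state (token, out); delimiter flushes the token, otherwise the char is appended.
def tokLoop : List Char → List Char → List String → List String
  | [], t, out => if t = [] then out else out ++ [String.mk t]
  | c :: cs, t, out =>
    if c = ' ' || c = '\n' then
      if t = [] then tokLoop cs [] out else tokLoop cs [] (out ++ [String.mk t])
    else tokLoop cs (t ++ [c]) out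

def tokenize_line (line : String) : List String := tokLoop line.toList [] []

-- ===== PORT B =====
-- port of re.findall(r'[^ \n]+', line): scan for the next match start, take the maximal run.
def pvNotDelim (c : Char) : Bool := c ≠ ' ' && c ≠ '\n'

def findAllRuns : List Char → List String
  | [] => []
  | c :: cs =>
    if pvNotDelim c then
      String.mk (c :: cs.takeWhile pvNotDelim) :: findAllRuns (cs.dropWhile pvNotDelim)
    else findAllRuns cs
termination_by cs => cs.length
decreasing_by
  · simpa using Nat.lt_succ_of_le (List.length_dropWhile_le pvNotDelim cs)
  · simp

def tokenize_line_alt (line : String) : List String := findAllRuns line.toList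

-- ===== PRECONDITION & SPEC =====
def Spec_tokenize_line (line : String) (out : List String) : Prop := out = tokenize_line_alt line
instance (line : String) (out : List String) : Decidable (Spec_tokenize_line line out) := by unfold Spec_tokenize_line; infer_instance

-- ===== CLAIM (what is proved, stated in full; the proofs are below) =====
def Claim_equal_tokenize_line : Prop := ∀ (line : String), Dom_tokenize_line line → Spec_tokenize_line line (tokenize_line line)

-- ===== LEMMAS AND PROOFS =====

theorem tokLoop_out (cs : List Char) : ∀ (t : List Char) (out : List String),
    tokLoop cs t out = out ++ tokLoop cs t [] := by
  induction cs with
  | nil =>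
    intro t out
    by_cases h : t = [] <;> simp [tokLoop, h]
  | cons c cs ih =>
    intro t out
    by_cases hd : (c = ' ' || c = '\n') = true
    · by_cases h : t = []
      · simp only [tokLoop]
        rw [if_pos hd, if_pos hd, if_pos h, if_pos h]
        exact ih [] out
      · simp only [tokLoop]
        rw [if_pos hd, if_pos hd, if_neg h, if_neg h,
          ih [] (out ++ [String.mk t]), ih [] ([] ++ [String.mk t])]
        simp
    · simp only [tokLoop]
      rw [if_neg hd, if_neg hd]
      exact ih (t ++ [c]) out

theorem tokLoop_runs (cs : List Char) :
    (∀ t : List Char, t ≠ [] →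
      tokLoop cs t [] = String.mk (t ++ cs.takeWhile pvNotDelim) :: findAllRuns (cs.dropWhile pvNotDelim))
    ∧ tokLoop cs [] [] = findAllRuns cs := by
  induction cs with
  | nil =>
    refine ⟨fun t ht => ?_, by simp [tokLoop, findAllRuns]⟩
    simp [tokLoop, ht, findAllRuns]
  | cons c cs ih =>
    by_cases hd : (c = ' ' || c = '\n') = true
    · have hnd : pvNotDelim c = false := by
        rcases Bool.or_eq_true _ _ |>.mp hd with h | h
        · simp [pvNotDelim, decide_eq_true_eq.mp h]
        · simp [pvNotDelim, decide_eq_true_eq.mp h]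
      constructor
      · intro t ht
        have h1 : List.takeWhile pvNotDelim (c :: cs) = [] := by
          simp [List.takeWhile_cons, hnd]
        have h2 : List.dropWhile pvNotDelim (c :: cs) = c :: cs := by
          simp [List.dropWhile_cons, hnd]
        rw [h1, h2]
        simp only [tokLoop]
        rw [if_pos hd, if_neg ht, tokLoop_out, ih.2]
        simp [findAllRuns, hnd]
      · simp only [tokLoop]
        rw [if_pos hd]
        simp [ih.2, findAllRuns, hnd]
    · have hnd : pvNotDelim c = true := by
        simp only [Bool.or_eq_true, decide_eq_true_eq] at hd
        push_neg at hd
        simp [pvNotDelim, hd.1, hd.2]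
      constructor
      · intro t ht
        simp only [tokLoop]
        rw [if_neg hd, ih.1 (t ++ [c]) (by simp)]
        simp [List.takeWhile_cons, List.dropWhile_cons, hnd]
      · simp only [tokLoop]
        rw [if_neg hd, List.nil_append, ih.1 [c] (by simp)]
        simp [findAllRuns, hnd]

-- ===== VERDICT (by name: the statement is the Claim_ definition above) =====
theorem tokenize_line_spec : Claim_equal_tokenize_line := by
  intro line _
  unfold Spec_tokenize_line tokenize_line tokenize_line_alt
  exact (tokLoop_runs line.toList).2
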